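-- pv_equiv track=rewrite | github.com/jst0951/CodingTest | 프로그래머스/2/135807. 숫자 카드 나누기/숫자 카드 나누기.py | solution
-- ===== SOURCE A (Python) =====
-- from math import gcd
--
-- def get_measure_list(n):
--     measure_list = []
--     for x in range(2, n+1):
--         if n % x == 0:
--             measure_list.append(x)
--     return measure_list
--
-- def solution(arrayA, arrayB):
--     gcd_A = arrayA[0]
--     gcd_B = arrayB[0]
--     for i in range(len(arrayA)):
--         gcd_A = gcd(gcd_A, arrayA[i])
--     for i in range(len(arrayB)):
--         gcd_B = gcd(gcd_B, arrayB[i])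
--
--     measure_A_list = get_measure_list(gcd_A)
--     measure_B_list = get_measure_list(gcd_B)
--
--     result_list = []
--     for measure_A in measure_A_list:
--         isValid = True
--         for num in arrayB:
--             if num % measure_A == 0:
--                 isValid = False
--                 break
--         if isValid == True:
--             result_list.append(measure_A)
--
--     for measure_B in measure_B_list:
--         isValid = True
--         for num in arrayA:
--             if num % measure_B == 0:
--                 isValid = False
--                 break
--         if isValid == True:
--             result_list.append(measure_B)
--
--     if len(result_list) == 0:
--         return 0
--     else:
--         return max(result_list)
-- ===== SOURCE B (Python) =====
-- from math import gcd
--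
--
-- def solution(arrayA, arrayB):
--     # Any common divisor d>=2 of one array divides its gcd g; if g divides some
--     # element of the other array then so does d, hence the only possible answer
--     # from that side is g itself.  So just test the two gcds.
--     def cand(arr, other):
--         g = 0
--         for x in arr:
--             g = gcd(g, x)
--         if g >= 2 and all(x % g != 0 for x in other):
--             return g
--         return 0
--
--     return max(cand(arrayA, arrayB), cand(arrayB, arrayA))
-- ===== Notes on version B (the rewrite author's own statement) =====
-- stated objective: simpler
-- what changed: B drops A's divisor enumeration of the two gcds and the nested validity scans: since every divisor of a gcd divides whatever the gcd divides, the only possible answer from each side is the gcd itself, so B just tests the two gcds against the opposite array.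
import Mathlib
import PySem

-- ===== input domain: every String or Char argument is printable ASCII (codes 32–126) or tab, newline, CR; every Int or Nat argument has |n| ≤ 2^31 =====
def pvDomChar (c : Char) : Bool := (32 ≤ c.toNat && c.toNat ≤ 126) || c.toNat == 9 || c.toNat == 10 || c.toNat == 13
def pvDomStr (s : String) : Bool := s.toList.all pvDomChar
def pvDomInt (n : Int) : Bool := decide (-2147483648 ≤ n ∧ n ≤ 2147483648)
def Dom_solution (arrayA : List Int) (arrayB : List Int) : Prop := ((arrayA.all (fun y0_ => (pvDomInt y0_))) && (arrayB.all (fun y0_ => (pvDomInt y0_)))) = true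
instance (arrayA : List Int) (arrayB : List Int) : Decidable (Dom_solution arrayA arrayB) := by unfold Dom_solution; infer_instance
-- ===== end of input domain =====

-- B replaces A's divisor enumeration of the two gcds (and the nested validity scans over the
-- opposite arrays) by testing only the two gcds themselves; objective: simpler.

-- ===== PORT A =====
-- math.gcd: always returns a nonnegative integer
def pygcd (a b : Int) : Int := Int.gcd a b

def get_measure_list (n : Int) : List Int :=
  (PySem.List.pyRange 2 (n+1) 1).foldl
    (fun acc x => if PySem.Int.mod n x == 0 then acc ++ [x] else acc) []

-- A raises IndexError on an empty arrayA/arrayB (at arrayA[0]/arrayB[0]); those inputs are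
-- outside Pre_solution, pyGetD gives the port the arbitrary value 0 there.
-- The inner 'for num … break' validity loop: once isValid is False it stays False, which is
-- exactly the foldl below.
def solution (arrayA : List Int) (arrayB : List Int) : Int :=
  let gcdA0 := PySem.List.pyGetD arrayA 0 0
  let gcdB0 := PySem.List.pyGetD arrayB 0 0
  let gcdA := (PySem.List.pyRange 0 arrayA.length 1).foldl
      (fun g i => pygcd g (PySem.List.pyGetD arrayA i 0)) gcdA0
  let gcdB := (PySem.List.pyRange 0 arrayB.length 1).foldl
      (fun g i => pygcd g (PySem.List.pyGetD arrayB i 0)) gcdB0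
  let measureA := get_measure_list gcdA
  let measureB := get_measure_list gcdB
  let r1 := measureA.foldl (fun acc m =>
      if arrayB.foldl (fun ok num => if PySem.Int.mod num m == 0 then false else ok) true
      then acc ++ [m] else acc) []
  let r2 := measureB.foldl (fun acc m =>
      if arrayA.foldl (fun ok num => if PySem.Int.mod num m == 0 then false else ok) true
      then acc ++ [m] else acc) r1
  if r2.length = 0 then 0
  else match PySem.List.max? r2 (fun x => x) with
       | some v => v
       | none => 0

-- ===== PORT B =====
-- 'g >= 2 and all(...)' short-circuits in Python, hence the nested ifs
def candGcd (arr other : List Int) : Int :=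
  let g := arr.foldl pygcd 0
  if 2 ≤ g then
    (if other.all (fun x => PySem.Int.mod x g != 0) then g else 0)
  else 0

def solution_alt (arrayA : List Int) (arrayB : List Int) : Int :=
  max (candGcd arrayA arrayB) (candGcd arrayB arrayA)

-- ===== PRECONDITION & SPEC =====
-- A indexes arrayA[0] and arrayB[0]: it raises IndexError iff either list is empty.
def Pre_solution (arrayA : List Int) (arrayB : List Int) : Prop := arrayA ≠ [] ∧ arrayB ≠ []
instance (arrayA : List Int) (arrayB : List Int) : Decidable (Pre_solution arrayA arrayB) := by
  unfold Pre_solution; infer_instance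
def pvWitness_solution : List Int × List Int := ([6, 9], [4])

def Spec_solution (arrayA : List Int) (arrayB : List Int) (out : Int) : Prop := out = solution_alt arrayA arrayB
instance (arrayA : List Int) (arrayB : List Int) (out : Int) : Decidable (Spec_solution arrayA arrayB out) := by unfold Spec_solution; infer_instance

-- ===== CLAIM (what is proved, stated in full; the proofs are below) =====
def Claim_equal_solution : Prop := ∀ (arrayA : List Int) (arrayB : List Int), Dom_solution arrayA arrayB → Pre_solution arrayA arrayB → Spec_solution arrayA arrayB (solution arrayA arrayB)

-- ===== LEMMAS AND PROOFS =====

-- A's gcd loop (seeded with arr[0], then folding over all of arr again) equals B's fold from 0,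
-- because gcd(a, a) = gcd(0, a).
theorem gcd_loop_eq (a : Int) (t : List Int) :
    (PySem.List.pyRange 0 (a :: t).length 1).foldl
      (fun g i => pygcd g (PySem.List.pyGetD (a :: t) i 0)) (PySem.List.pyGetD (a :: t) 0 0)
    = (a :: t).foldl pygcd 0 := by
  rw [PySem.List.foldl_pyRange_zero_pyGetD' (a :: t) 0 pygcd]
  have h0 : PySem.List.pyGetD (a :: t) 0 0 = a := by
    rw [PySem.List.pyGetD_eq_getElem] <;> simp
  rw [h0, List.foldl_cons, List.foldl_cons]
  have : pygcd a a = pygcd 0 a := by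
    simp [pygcd, Int.gcd_self]
  rw [this]

theorem mem_get_measure_list {n m : Int} :
    m ∈ get_measure_list n ↔ 2 ≤ m ∧ m ≤ n ∧ m ∣ n := by
  unfold get_measure_list
  rw [PySem.List.foldl_append_if_eq_filter]
  simp [List.mem_filter, PySem.List.mem_pyRange_one, PySem.Int.mod_eq_zero_iff_dvd]
  tauto

-- the inner break-loop of A is a negated any
theorem valid_loop_eq (l : List Int) (m : Int) :
    l.foldl (fun ok num => if PySem.Int.mod num m == 0 then false else ok) true
    = !l.any (fun num => PySem.Int.mod num m == 0) := by
  rw [PySem.List.foldl_if_false_eq]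
  simp

-- Python max of a nonempty list whose maximum value is v
theorem max?_eq_of_max (l : List Int) (v : Int) (hv : v ∈ l) (hall : ∀ x ∈ l, x ≤ v) :
    PySem.List.max? l (fun x => x) = some v := by
  cases h : PySem.List.max? l (fun x => x) with
  | none =>
      rw [PySem.List.max?_eq_none_iff] at h
      subst h; simp at hv
  | some m =>
      have hm := PySem.List.max?_mem h
      have h1 := PySem.List.max?_isMax h v hv
      have h1' : v ≤ m := by simpa using h1
      have : m = v := le_antisymm (hall m hm) h1'
      rw [this]

-- if the gcd g itself divides some element of the other array (or g < 2), every divisor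
-- m ≥ 2 of g divides that element too, so A keeps nothing from this side
theorem side_empty (g : Int) (other : List Int)
    (h : ¬(2 ≤ g ∧ other.all (fun x => PySem.Int.mod x g != 0) = true)) :
    (get_measure_list g).filter (fun m => !other.any (fun num => PySem.Int.mod num m == 0)) = [] := by
  rw [List.filter_eq_nil_iff]
  intro m hm
  rw [mem_get_measure_list] at hm
  obtain ⟨h2, hle, hdvd⟩ := hm
  by_cases hg : 2 ≤ g
  · have hex : ∃ x ∈ other, PySem.Int.mod x g = 0 := by
      by_contra hc
      push Not at hc
      exact h ⟨hg, by simp [List.all_eq_true]; intro x hx; exact hc x hx⟩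
    obtain ⟨x, hx, hxg⟩ := hex
    rw [PySem.Int.mod_eq_zero_iff_dvd] at hxg
    simp only [List.any_eq_true, Bool.not_eq_true', Bool.not_eq_false]
    exact ⟨x, hx, by rw [beq_iff_eq, PySem.Int.mod_eq_zero_iff_dvd]; exact hdvd.trans hxg⟩
  · omega

-- if g ≥ 2 divides no element of the other array, A keeps g from this side and everything
-- kept from this side is ≤ g
theorem side_max (g : Int) (other : List Int) (h2 : 2 ≤ g)
    (hall : other.all (fun x => PySem.Int.mod x g != 0) = true) :
    g ∈ (get_measure_list g).filter (fun m => !other.any (fun num => PySem.Int.mod num m == 0)) ∧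
    ∀ m ∈ (get_measure_list g).filter (fun m => !other.any (fun num => PySem.Int.mod num m == 0)),
      m ≤ g := by
  constructor
  · rw [List.mem_filter, mem_get_measure_list]
    refine ⟨⟨h2, le_rfl, dvd_rfl⟩, ?_⟩
    simp only [List.all_eq_true] at hall
    rw [Bool.not_eq_true', List.any_eq_false]
    intro x hx
    simpa using hall x hx
  · intro m hm
    rw [List.mem_filter, mem_get_measure_list] at hm
    exact hm.1.2.1

theorem main_thm (arrayA arrayB : List Int) (hA : arrayA ≠ []) (hB : arrayB ≠ []) :
    solution arrayA arrayB = solution_alt arrayA arrayB := by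
  obtain ⟨a, t, rfl⟩ : ∃ a t, arrayA = a :: t := by
    cases arrayA with
    | nil => exact absurd rfl hA
    | cons a t => exact ⟨a, t, rfl⟩
  obtain ⟨b, s, rfl⟩ : ∃ b s, arrayB = b :: s := by
    cases arrayB with
    | nil => exact absurd rfl hB
    | cons b s => exact ⟨b, s, rfl⟩
  unfold solution solution_alt candGcd
  dsimp only
  rw [gcd_loop_eq, gcd_loop_eq]
  simp only [valid_loop_eq, PySem.List.foldl_append_if_eq_filter, List.nil_append]
  set gA := (a :: t).foldl pygcd 0 with hgA
  set gB := (b :: s).foldl pygcd 0 with hgB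
  set LA := (get_measure_list gA).filter
      (fun m => !(b :: s).any (fun num => PySem.Int.mod num m == 0)) with hLA
  set LB := (get_measure_list gB).filter
      (fun m => !(a :: t).any (fun num => PySem.Int.mod num m == 0)) with hLB
  by_cases cA : 2 ≤ gA ∧ (b :: s).all (fun x => PySem.Int.mod x gA != 0) = true <;>
  by_cases cB : 2 ≤ gB ∧ (a :: t).all (fun x => PySem.Int.mod x gB != 0) = true
  · -- both gcds valid: max of A's result list is max gA gB
    obtain ⟨hgA2, hallA⟩ := cA
    obtain ⟨hgB2, hallB⟩ := cB
    obtain ⟨hmemA, hleA⟩ := side_max gA (b :: s) hgA2 hallA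
    obtain ⟨hmemB, hleB⟩ := side_max gB (a :: t) hgB2 hallB
    rw [if_pos hgA2, if_pos hallA, if_pos hgB2, if_pos hallB]
    have hv : max gA gB ∈ LA ++ LB := by
      rcases le_total gA gB with h | h
      · rw [max_eq_right h]; exact List.mem_append_right _ hmemB
      · rw [max_eq_left h]; exact List.mem_append_left _ hmemA
    have hall : ∀ x ∈ LA ++ LB, x ≤ max gA gB := by
      intro x hx
      rcases List.mem_append.mp hx with h | h
      · exact le_trans (hleA x h) (le_max_left _ _)
      · exact le_trans (hleB x h) (le_max_right _ _)
    rw [max?_eq_of_max _ _ hv hall]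
    rw [if_neg (by intro h; rw [List.length_eq_zero_iff] at h; rw [h] at hv; simp at hv)]
  · -- only gA valid
    obtain ⟨hgA2, hallA⟩ := cA
    obtain ⟨hmemA, hleA⟩ := side_max gA (b :: s) hgA2 hallA
    rw [← hLA] at hmemA hleA
    have hBnil : LB = [] := side_empty gB (a :: t) cB
    rw [if_pos hgA2, if_pos hallA]
    have h0 : (if 2 ≤ gB then (if (a :: t).all (fun x => PySem.Int.mod x gB != 0) then gB else 0) else 0) = 0 := by
      split_ifs with h1 h2
      · exact absurd ⟨h1, h2⟩ cB
      · rfl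
      · rfl
    rw [h0, hBnil, List.append_nil]
    rw [max?_eq_of_max _ _ hmemA hleA]
    rw [if_neg (by intro h; rw [List.length_eq_zero_iff] at h; rw [h] at hmemA; simp at hmemA)]
    dsimp only
    omega
  · -- only gB valid
    obtain ⟨hgB2, hallB⟩ := cB
    obtain ⟨hmemB, hleB⟩ := side_max gB (a :: t) hgB2 hallB
    rw [← hLB] at hmemB hleB
    have hAnil : LA = [] := side_empty gA (b :: s) cA
    rw [if_pos hgB2, if_pos hallB]
    have h0 : (if 2 ≤ gA then (if (b :: s).all (fun x => PySem.Int.mod x gA != 0) then gA else 0) else 0) = 0 := by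
      split_ifs with h1 h2
      · exact absurd ⟨h1, h2⟩ cA
      · rfl
      · rfl
    rw [h0, hAnil, List.nil_append]
    rw [max?_eq_of_max _ _ hmemB hleB]
    rw [if_neg (by intro h; rw [List.length_eq_zero_iff] at h; rw [h] at hmemB; simp at hmemB)]
    dsimp only
    omega
  · -- neither gcd valid: A's result list is empty, B returns max 0 0
    have hAnil : LA = [] := side_empty gA (b :: s) cA
    have hBnil : LB = [] := side_empty gB (a :: t) cB
    rw [hAnil, hBnil]
    have h0A : (if 2 ≤ gA then (if (b :: s).all (fun x => PySem.Int.mod x gA != 0) then gA else 0) else 0) = 0 := by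
      split_ifs with h1 h2
      · exact absurd ⟨h1, h2⟩ cA
      · rfl
      · rfl
    have h0B : (if 2 ≤ gB then (if (a :: t).all (fun x => PySem.Int.mod x gB != 0) then gB else 0) else 0) = 0 := by
      split_ifs with h1 h2
      · exact absurd ⟨h1, h2⟩ cB
      · rfl
      · rfl
    rw [h0A, h0B]
    simp

-- ===== VERDICT (by name: the statement is the Claim_ definition above) =====
theorem solution_spec : Claim_equal_solution := by
  intro arrayA arrayB _ hpre
  exact main_thm arrayA arrayB hpre.1 hpre.2
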